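-- pv_equiv track=rewrite | github.com/Heltev/adventofcode_2023 | 1/day1.py | find_integer_string
-- ===== SOURCE A (Python) =====
-- def get_number_strings():
--   return ['one', 'two', 'three', 'four', 'five', 'six', 'seven','eight', 'nine']
--
-- def find_integer_string(line):
--   index_left = 1000000
--   index_right = -1
--   number_left = ''
--   number_right = ''
--   for number in get_number_strings():
--     for index in range(len(line)):
--       if line.find(number,index) >= 0:
--         if line.find(number,index) < index_left:
--           index_left = line.find(number,index)
--           number_left = convert_from_string_to_int(number)
--         if line.find(number,index) > index_right:
--           index_right = line.find(number,index)
--           number_right = convert_from_string_to_int(number)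
--   return index_left,index_right,number_left,number_right
--
-- def convert_from_string_to_int(string):
--   if string == 'one': return '1'
--   elif string == 'two': return '2'
--   elif string == 'three': return '3'
--   elif string == 'four': return '4'
--   elif string == 'five': return '5'
--   elif string == 'six': return '6'
--   elif string == 'seven': return '7'
--   elif string == 'eight': return '8'
--   elif string == 'nine': return '9'
-- ===== SOURCE B (Python) =====
-- def get_number_strings():
--   return ['one', 'two', 'three', 'four', 'five', 'six', 'seven', 'eight', 'nine']
--
-- def convert_from_string_to_int(string):
--   if string == 'one': return '1'
--   elif string == 'two': return '2'
--   elif string == 'three': return '3'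
--   elif string == 'four': return '4'
--   elif string == 'five': return '5'
--   elif string == 'six': return '6'
--   elif string == 'seven': return '7'
--   elif string == 'eight': return '8'
--   elif string == 'nine': return '9'
--
-- def find_integer_string(line):
--   index_left = 1000000
--   index_right = -1
--   number_left = ''
--   number_right = ''
--   for i in range(len(line)):
--     digit = None
--     for word in get_number_strings():
--       if line.startswith(word, i):
--         digit = convert_from_string_to_int(word)
--         break
--     if digit is None:
--       continue
--     if i < index_left:
--       index_left = i
--       number_left = digit
--     if i > index_right:
--       index_right = i
--       number_right = digit
--   return index_left, index_right, number_left, number_right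
-- ===== Notes on version B (the rewrite author's own statement) =====
-- stated objective: faster
-- what changed: A loops over the nine words and, for each word, over every start index calling line.find(number, index) repeatedly; B makes a single pass over positions i, testing line.startswith(word, i) for each word, tracking the smallest and largest matching position in one traversal.
import Mathlib
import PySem

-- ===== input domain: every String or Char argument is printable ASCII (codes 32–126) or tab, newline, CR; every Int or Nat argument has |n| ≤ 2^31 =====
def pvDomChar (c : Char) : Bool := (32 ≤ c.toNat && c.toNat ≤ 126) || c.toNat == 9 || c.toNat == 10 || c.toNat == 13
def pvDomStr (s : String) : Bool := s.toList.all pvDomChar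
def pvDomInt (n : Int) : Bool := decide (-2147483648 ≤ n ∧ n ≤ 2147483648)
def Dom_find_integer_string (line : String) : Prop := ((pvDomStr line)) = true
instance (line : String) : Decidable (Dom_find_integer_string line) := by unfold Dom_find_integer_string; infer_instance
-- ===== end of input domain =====

-- B replaces A's per-word scan (calling line.find(number, index) at every start index, for every
-- word) by a single pass over positions testing startswith — same return value, a different traversal.


-- ===== PORT A =====
def get_number_strings : List String :=
  ["one", "two", "three", "four", "five", "six", "seven", "eight", "nine"]

-- Python's convert_from_string_to_int falls off the end (None) on other strings; both programs
-- only ever apply it to the nine words above, where it is exact.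
def convert_from_string_to_int (string : String) : String :=
  if string = "one" then "1"
  else if string = "two" then "2"
  else if string = "three" then "3"
  else if string = "four" then "4"
  else if string = "five" then "5"
  else if string = "six" then "6"
  else if string = "seven" then "7"
  else if string = "eight" then "8"
  else if string = "nine" then "9"
  else ""

-- body of A's inner loop: state (index_left, index_right, number_left, number_right)
def stepAIdx (line number : String) (st : Int × Int × String × String) (index : Int) :
    Int × Int × String × String :=
  if 0 ≤ PySem.Str.findFrom line number index none then      -- line.find(number, index) >= 0
    let f := PySem.Str.findFrom line number index none
    let st1 := if f < st.1 then (f, st.2.1, convert_from_string_to_int number, st.2.2.2) else st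
    if st1.2.1 < f then (st1.1, f, st1.2.2.1, convert_from_string_to_int number) else st1
  else st

def find_integer_string (line : String) : Int × Int × String × String :=
  get_number_strings.foldl
    (fun st number =>
      (PySem.List.pyRange 0 (PySem.Str.len line) 1).foldl (stepAIdx line number) st)
    (1000000, -1, "", "")

-- ===== PORT B =====
-- B's inner word loop with break: first word starting at position i (converted), if any.
-- line.startswith(word, i) with 0 ≤ i is exactly: word is a prefix of line[i:].
def matchAt (cs : List Char) (i : Nat) : Option String :=
  (get_number_strings.find? (fun w => w.toList.isPrefixOf (cs.drop i))).map
    convert_from_string_to_int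

-- body of B's single loop over positions
def stepPos (cs : List Char) (st : Int × Int × String × String) (i : Nat) :
    Int × Int × String × String :=
  match matchAt cs i with
  | none => st
  | some digit =>
    let st1 := if (i : Int) < st.1 then ((i : Int), st.2.1, digit, st.2.2.2) else st
    if st1.2.1 < (i : Int) then (st1.1, (i : Int), st1.2.2.1, digit) else st1

def find_integer_string_alt (line : String) : Int × Int × String × String :=
  (List.range line.toList.length).foldl (stepPos line.toList) (1000000, -1, "", "")

-- ===== PRECONDITION & SPEC =====
def Spec_find_integer_string (line : String) (out : Int × Int × String × String) : Prop := out = find_integer_string_alt line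
instance (line : String) (out : Int × Int × String × String) : Decidable (Spec_find_integer_string line out) := by unfold Spec_find_integer_string; infer_instance

-- ===== CLAIM (what is proved, stated in full; the proofs are below) =====
def Claim_equal_find_integer_string : Prop := ∀ (line : String), Dom_find_integer_string line → Spec_find_integer_string line (find_integer_string line)

-- ===== LEMMAS AND PROOFS =====

-- ---------- Part 1: A's double fold equals one find/rfind update per word (stepB) ----------

def stepB (line : String) (st : Int × Int × String × String) (w : String) :
    Int × Int × String × String :=
  let f := PySem.Str.find line w
  let st1 := if 0 ≤ f ∧ f < st.1 then (f, st.2.1, convert_from_string_to_int w, st.2.2.2) else st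
  let r := PySem.Str.rfind line w
  if st1.2.1 < r then (st1.1, r, st1.2.2.1, convert_from_string_to_int w) else st1

def updLR (f r : Int) (c : String) (st : Int × Int × String × String) :
    Int × Int × String × String :=
  let st1 := if 0 ≤ f ∧ f < st.1 then (f, st.2.1, c, st.2.2.2) else st
  if 0 ≤ f ∧ st1.2.1 < r then (st1.1, r, st1.2.2.1, c) else st1

def rhsTail (line w : String) (a : Nat) (st : Int × Int × String × String) :
    Int × Int × String × String :=
  updLR (PySem.Chars.findFrom line.toList w.toList (a : Int) none)
        (PySem.Chars.rfind line.toList w.toList)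
        (convert_from_string_to_int w) st

lemma stepAIdx_eq_updLR (line w : String) (st : Int × Int × String × String) (i : Int) :
    stepAIdx line w st i =
      updLR (PySem.Str.findFrom line w i none) (PySem.Str.findFrom line w i none)
        (convert_from_string_to_int w) st := by
  obtain ⟨il, ir, nl, nr⟩ := st
  simp only [stepAIdx, updLR]
  split_ifs <;> first | rfl | omega

lemma updLR_ir_ge (f r : Int) (c : String) (st : Int × Int × String × String)
    (h : -1 ≤ st.2.1) (hr : -1 ≤ r) : -1 ≤ (updLR f r c st).2.1 := by
  obtain ⟨il, ir, nl, nr⟩ := st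
  simp only [updLR]
  split_ifs <;> simp_all

lemma updLR_compose (f g r il ir : Int) (c nl nr : String)
    (h0 : 0 ≤ f) (hfr : f ≤ r)
    (hg : g = f ∨ (f < g ∧ g ≤ r) ∨ (g = -1 ∧ r = f)) :
    updLR g r c (updLR f f c (il, ir, nl, nr)) = updLR f r c (il, ir, nl, nr) := by
  simp only [updLR]
  split_ifs <;> first | rfl | (simp_all; omega) | omega

lemma rfind_go_ge (cs wl : List Char) :
    ∀ (k j : Nat), j ≤ k → wl <+: cs.drop j → (j : Int) ≤ PySem.Chars.rfind.go cs wl k := by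
  intro k
  induction k with
  | zero =>
    intro j hj hp
    interval_cases j
    have : wl.isPrefixOf (cs.drop 0) = true := by simpa [List.isPrefixOf_iff_prefix] using hp
    simp at this
    show (0:Int) ≤ PySem.Chars.rfind.go cs wl 0
    rw [show PySem.Chars.rfind.go cs wl 0 = if wl.isPrefixOf cs then 0 else -1 from rfl]
    simp [this]
  | succ k ih =>
    intro j hj hp
    rw [show PySem.Chars.rfind.go cs wl (k+1)
        = if wl.isPrefixOf (cs.drop (k+1)) then ((k:Int)+1) else PySem.Chars.rfind.go cs wl k from rfl]
    split_ifs with h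
    · exact_mod_cast Int.ofNat_le.mpr hj
    · rcases Nat.lt_or_ge j (k+1) with hlt | hge
      · exact ih j (by omega) hp
      · exfalso
        have hjk : j = k + 1 := by omega
        subst hjk
        simp [List.isPrefixOf_iff_prefix, hp] at h

lemma rfind_go_cases (cs wl : List Char) :
    ∀ (k : Nat), PySem.Chars.rfind.go cs wl k = -1 ∨
      (0 ≤ PySem.Chars.rfind.go cs wl k ∧
       wl <+: cs.drop (PySem.Chars.rfind.go cs wl k).toNat) := by
  intro k
  induction k with
  | zero =>
    rw [show PySem.Chars.rfind.go cs wl 0 = if wl.isPrefixOf cs then 0 else -1 from rfl]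
    split_ifs with h
    · right
      refine ⟨by norm_num, ?_⟩
      simpa [List.isPrefixOf_iff_prefix] using h
    · left; rfl
  | succ k ih =>
    rw [show PySem.Chars.rfind.go cs wl (k+1)
        = if wl.isPrefixOf (cs.drop (k+1)) then ((k:Int)+1) else PySem.Chars.rfind.go cs wl k from rfl]
    split_ifs with h
    · right
      refine ⟨by positivity, ?_⟩
      have : ((k:Int) + 1).toNat = k + 1 := by omega
      rw [this]
      simpa [List.isPrefixOf_iff_prefix] using h
    · exact ih

lemma le_rfind (cs wl : List Char) (hw : wl ≠ []) (j : Nat) (hp : wl <+: cs.drop j) :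
    (j : Int) ≤ PySem.Chars.rfind cs wl := by
  have hj : j ≤ cs.length := by
    by_contra hgt
    have : cs.drop j = [] := List.drop_eq_nil_of_le (by omega)
    rw [this] at hp
    exact hw (List.prefix_nil.mp hp)
  exact rfind_go_ge cs wl cs.length j hj hp

lemma rfind_cases (cs wl : List Char) :
    PySem.Chars.rfind cs wl = -1 ∨
      (0 ≤ PySem.Chars.rfind cs wl ∧ wl <+: cs.drop (PySem.Chars.rfind cs wl).toNat) :=
  rfind_go_cases cs wl cs.length

lemma findFrom_len_eq_neg_one (cs wl : List Char) (hw : wl ≠ []) :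
    PySem.Chars.findFrom cs wl (cs.length : Int) none = -1 := by
  rw [PySem.Chars.findFrom_natCast_eq_neg_one_iff cs wl cs.length le_rfl]
  simp only [List.drop_length]
  intro hinf
  exact hw (List.infix_nil.mp hinf)

lemma findFrom_neg_or_nonneg (cs wl : List Char) (a : Nat) (ha : a ≤ cs.length) :
    PySem.Chars.findFrom cs wl (a : Int) none = -1 ∨
      0 ≤ PySem.Chars.findFrom cs wl (a : Int) none := by
  rw [PySem.Chars.findFrom_natCast cs wl a ha]
  split_ifs with h
  · left; rfl
  · right
    have := PySem.Chars.neg_one_le_find (cs.drop a) wl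
    omega

lemma drop_suffix_drop (cs : List Char) (k m : Nat) (h : k ≤ m) : cs.drop m <:+ cs.drop k := by
  have h2 := List.drop_suffix (m - k) (cs.drop k)
  rwa [List.drop_drop, show k + (m - k) = m from by omega] at h2

lemma findFrom_succ_neg (cs wl : List Char) (a : Nat) (ha : a < cs.length)
    (h : PySem.Chars.findFrom cs wl (a : Int) none = -1) :
    PySem.Chars.findFrom cs wl ((a + 1 : Nat) : Int) none = -1 := by
  rw [PySem.Chars.findFrom_natCast_eq_neg_one_iff cs wl a (by omega)] at h
  rw [PySem.Chars.findFrom_natCast_eq_neg_one_iff cs wl (a+1) (by omega)]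
  intro hinf
  exact h (hinf.trans (drop_suffix_drop cs a (a+1) (by omega)).isInfix)

lemma findFrom_succ_eq (cs wl : List Char) (a : Nat) (ha : a < cs.length)
    (h0 : 0 ≤ PySem.Chars.findFrom cs wl (a : Int) none)
    (hgt : (a : Int) < PySem.Chars.findFrom cs wl (a : Int) none) :
    PySem.Chars.findFrom cs wl ((a + 1 : Nat) : Int) none =
      PySem.Chars.findFrom cs wl (a : Int) none := by
  set fa := PySem.Chars.findFrom cs wl (a : Int) none with hfa
  have hspec := PySem.Chars.findFrom_natCast_spec cs wl a (by omega) (by omega)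
  obtain ⟨hle, hpre, hmin⟩ := hspec
  set fb := PySem.Chars.findFrom cs wl ((a + 1 : Nat) : Int) none with hfb
  have hinf : wl <:+: cs.drop (a+1) :=
    hpre.isInfix.trans (drop_suffix_drop cs (a+1) fa.toNat (by omega)).isInfix
  have hbne : fb ≠ -1 := by
    rw [hfb, ne_eq, PySem.Chars.findFrom_natCast_eq_neg_one_iff cs wl (a+1) (by omega)]
    exact not_not_intro hinf
  have hbspec := PySem.Chars.findFrom_natCast_spec cs wl (a+1) (by omega) (by exact_mod_cast hbne)
  obtain ⟨hble, hbpre, hbmin⟩ := hbspec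
  rw [← hfb] at hble hbpre hbmin
  by_contra hne
  rcases lt_or_gt_of_ne hne with hlt | hgt2
  · exact hmin fb.toNat (by omega) (by omega) hbpre
  · exact hbmin fa.toNat (by omega) (by omega) hpre

lemma updLR_of_neg (f r : Int) (c : String) (st : Int × Int × String × String)
    (h : f < 0) : updLR f r c st = st := by
  simp only [updLR]
  split_ifs <;> first | rfl | omega

lemma stepAIdx_ir_ge (line w : String) (st : Int × Int × String × String) (h : -1 ≤ st.2.1)
    (a : Nat) (ha : a ≤ line.toList.length) : -1 ≤ (stepAIdx line w st (a : Int)).2.1 := by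
  rw [stepAIdx_eq_updLR]
  apply updLR_ir_ge _ _ _ _ h
  rw [PySem.Str.findFrom_eq]
  rcases findFrom_neg_or_nonneg line.toList w.toList a ha with h1 | h1 <;> omega

lemma inner_go (line w : String) (hw : w.toList ≠ []) :
    ∀ (k a : Nat), a + k = line.toList.length →
    ∀ (st : Int × Int × String × String), -1 ≤ st.2.1 →
      (PySem.List.pyRange (a : Int) (line.toList.length : Int) 1).foldl (stepAIdx line w) st =
        rhsTail line w a st := by
  intro k
  induction k with
  | zero =>
    intro a ha st hir
    have hae : a = line.toList.length := by omega
    subst hae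
    rw [PySem.List.pyRange_one_eq_nil le_rfl]
    rw [List.foldl_nil, rhsTail, findFrom_len_eq_neg_one line.toList w.toList hw,
      updLR_of_neg _ _ _ _ (by norm_num)]
  | succ k ih =>
    intro a ha st hir
    have hlt : a < line.toList.length := by omega
    rw [PySem.List.pyRange_one_cons (by exact_mod_cast hlt)]
    rw [List.foldl_cons, show ((a : Int) + 1) = ((a + 1 : Nat) : Int) by push_cast; ring,
      ih (a+1) (by omega) _ (stepAIdx_ir_ge line w st hir a (by omega))]
    rw [stepAIdx_eq_updLR, PySem.Str.findFrom_eq]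
    unfold rhsTail
    obtain ⟨il, ir, nl, nr⟩ := st
    rcases findFrom_neg_or_nonneg line.toList w.toList a (by omega) with hfa | hfa
    · have hfb := findFrom_succ_neg line.toList w.toList a hlt hfa
      rw [hfb, hfa, updLR_of_neg _ _ _ _ (by norm_num), updLR_of_neg _ _ _ _ (by norm_num),
        updLR_of_neg _ _ _ _ (by norm_num)]
    · obtain ⟨hle, hpre, hmin⟩ :=
        PySem.Chars.findFrom_natCast_spec line.toList w.toList a (by omega) (by omega)
      have hfar : PySem.Chars.findFrom line.toList w.toList (a : Int) none ≤
          PySem.Chars.rfind line.toList w.toList := by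
        have := le_rfind line.toList w.toList hw
          (PySem.Chars.findFrom line.toList w.toList (a : Int) none).toNat hpre
        omega
      by_cases hgt : (a : Int) < PySem.Chars.findFrom line.toList w.toList (a : Int) none
      · have hfb := findFrom_succ_eq line.toList w.toList a hlt hfa hgt
        rw [hfb]
        exact updLR_compose _ _ _ _ _ _ _ _ hfa hfar (Or.inl rfl)
      · have hfa_a : PySem.Chars.findFrom line.toList w.toList (a : Int) none = (a : Int) := by
          omega
        have hpa : w.toList <+: line.toList.drop a := by
          have h2 := hpre
          rw [hfa_a] at h2
          simpa using h2
        rcases findFrom_neg_or_nonneg line.toList w.toList (a+1) (by omega) with hfb | hfb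
        · have hra : (a : Int) ≤ PySem.Chars.rfind line.toList w.toList :=
            le_rfind line.toList w.toList hw a hpa
          have hrb : PySem.Chars.rfind line.toList w.toList ≤ (a : Int) := by
            rcases rfind_cases line.toList w.toList with h1 | ⟨h1, h2⟩
            · omega
            · by_contra hcon
              rw [PySem.Chars.findFrom_natCast_eq_neg_one_iff line.toList w.toList (a+1)
                (by omega)] at hfb
              exact hfb (h2.isInfix.trans
                (drop_suffix_drop line.toList (a+1)
                  (PySem.Chars.rfind line.toList w.toList).toNat (by omega)).isInfix)
          rw [hfb]
          exact updLR_compose _ _ _ _ _ _ _ _ hfa hfar (Or.inr (Or.inr (by omega)))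
        · obtain ⟨hble, hbpre, _⟩ :=
            PySem.Chars.findFrom_natCast_spec line.toList w.toList (a+1) (by omega) (by omega)
          have hfbr : PySem.Chars.findFrom line.toList w.toList ((a+1 : Nat) : Int) none ≤
              PySem.Chars.rfind line.toList w.toList := by
            have := le_rfind line.toList w.toList hw
              (PySem.Chars.findFrom line.toList w.toList ((a+1 : Nat) : Int) none).toNat hbpre
            omega
          refine updLR_compose _ _ _ _ _ _ _ _ hfa hfar (Or.inr (Or.inl ⟨by omega, hfbr⟩))

lemma rhsTail_zero (line w : String) (st : Int × Int × String × String)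
    (hir : -1 ≤ st.2.1) : rhsTail line w 0 st = stepB line st w := by
  obtain ⟨il, ir, nl, nr⟩ := st
  have hfind : ir < PySem.Chars.rfind line.toList w.toList →
      0 ≤ PySem.Chars.find line.toList w.toList := by
    intro hr
    rcases rfind_cases line.toList w.toList with h1 | ⟨h1, h2⟩
    · simp only at hir; omega
    · rw [PySem.Chars.find_nonneg_iff]
      exact h2.isInfix.trans
        (List.drop_suffix (PySem.Chars.rfind line.toList w.toList).toNat line.toList).isInfix
  by_cases hrr : ir < PySem.Chars.rfind line.toList w.toList
  · have h0f := hfind hrr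
    simp only [rhsTail, updLR, stepB, PySem.Str.find_eq, PySem.Str.rfind_eq,
      show ((0:Nat):Int) = (0:Int) from rfl, PySem.Chars.findFrom_zero]
    split_ifs <;> first | rfl | omega | (dsimp only at *; omega)
  · simp only [rhsTail, updLR, stepB, PySem.Str.find_eq, PySem.Str.rfind_eq,
      show ((0:Nat):Int) = (0:Int) from rfl, PySem.Chars.findFrom_zero]
    split_ifs <;> first | rfl | omega | (dsimp only at *; omega)

lemma inner_eq_stepB (line w : String) (hw : w.toList ≠ []) (st : Int × Int × String × String)
    (hir : -1 ≤ st.2.1) :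
    (PySem.List.pyRange 0 (PySem.Str.len line) 1).foldl (stepAIdx line w) st = stepB line st w := by
  have h := inner_go line w hw line.toList.length 0 (by omega) st hir
  rw [rhsTail_zero line w st hir] at h
  simpa [PySem.Str.len_eq] using h

lemma stepB_ir_ge (line w : String) (st : Int × Int × String × String) (h : -1 ≤ st.2.1) :
    -1 ≤ (stepB line st w).2.1 := by
  obtain ⟨il, ir, nl, nr⟩ := st
  simp only [stepB]
  split_ifs <;> simp_all <;> omega

lemma outer_fold (line : String) :
    ∀ (ws : List String), (∀ w ∈ ws, w.toList ≠ []) →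
    ∀ (st : Int × Int × String × String), -1 ≤ st.2.1 →
      ws.foldl (fun st number =>
          (PySem.List.pyRange 0 (PySem.Str.len line) 1).foldl (stepAIdx line number) st) st =
        ws.foldl (stepB line) st := by
  intro ws
  induction ws with
  | nil => intro _ st _; rfl
  | cons w rest ih =>
    intro hne st hir
    simp only [List.foldl_cons]
    rw [inner_eq_stepB line w (hne w (by simp)) st hir]
    exact ih (fun x hx => hne x (by simp [hx])) _ (stepB_ir_ge line w st hir)

-- ---------- Part 2: both folds split into independent left/right component folds ----------

def stepL (cs : List Char) (p : Int × String) (w : String) : Int × String :=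
  if 0 ≤ PySem.Chars.find cs w.toList ∧ PySem.Chars.find cs w.toList < p.1 then
    (PySem.Chars.find cs w.toList, convert_from_string_to_int w) else p

def stepR (cs : List Char) (p : Int × String) (w : String) : Int × String :=
  if p.1 < PySem.Chars.rfind cs w.toList then
    (PySem.Chars.rfind cs w.toList, convert_from_string_to_int w) else p

def stepLp (cs : List Char) (p : Int × String) (i : Nat) : Int × String :=
  match matchAt cs i with
  | none => p
  | some d => if (i : Int) < p.1 then ((i : Int), d) else p

def stepRp (cs : List Char) (p : Int × String) (i : Nat) : Int × String :=
  match matchAt cs i with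
  | none => p
  | some d => if p.1 < (i : Int) then ((i : Int), d) else p

lemma foldB_split (line : String) :
    ∀ (ws : List String) (st : Int × Int × String × String),
      ws.foldl (stepB line) st =
        ((ws.foldl (stepL line.toList) (st.1, st.2.2.1)).1,
         (ws.foldl (stepR line.toList) (st.2.1, st.2.2.2)).1,
         (ws.foldl (stepL line.toList) (st.1, st.2.2.1)).2,
         (ws.foldl (stepR line.toList) (st.2.1, st.2.2.2)).2) := by
  intro ws
  induction ws with
  | nil => intro st; rfl
  | cons w rest ih =>
    intro st
    obtain ⟨il, ir, nl, nr⟩ := st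
    simp only [List.foldl_cons]
    rw [ih]
    congr 1 <;> [skip; congr 1] <;>
    · simp only [stepB, stepL, stepR, PySem.Str.find_eq, PySem.Str.rfind_eq]
      split_ifs <;> first | rfl | omega
  
lemma foldPos_split (cs : List Char) :
    ∀ (l : List Nat) (st : Int × Int × String × String),
      l.foldl (stepPos cs) st =
        ((l.foldl (stepLp cs) (st.1, st.2.2.1)).1,
         (l.foldl (stepRp cs) (st.2.1, st.2.2.2)).1,
         (l.foldl (stepLp cs) (st.1, st.2.2.1)).2,
         (l.foldl (stepRp cs) (st.2.1, st.2.2.2)).2) := by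
  intro l
  induction l with
  | nil => intro st; rfl
  | cons i rest ih =>
    intro st
    obtain ⟨il, ir, nl, nr⟩ := st
    simp only [List.foldl_cons]
    rw [ih]
    congr 1 <;> [skip; congr 1] <;>
    · simp only [stepPos, stepLp, stepRp]
      cases matchAt cs i <;> simp only <;> split_ifs <;> first | rfl | omega

-- ---------- Part 3: matchAt facts and word uniqueness ----------

lemma words_ne : ∀ w ∈ get_number_strings, w.toList ≠ [] := by decide

lemma words_uniq_at (w1 w2 : String) (h1 : w1 ∈ get_number_strings)
    (h2 : w2 ∈ get_number_strings) (t : List Char)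
    (hp1 : w1.toList <+: t) (hp2 : w2.toList <+: t) : w1 = w2 := by
  have hpp := List.prefix_or_prefix_of_prefix hp1 hp2
  have key : ∀ a ∈ get_number_strings, ∀ b ∈ get_number_strings,
      a.toList <+: b.toList → a = b := by decide
  rcases hpp with h | h
  · exact key w1 h1 w2 h2 h
  · exact (key w2 h2 w1 h1 h).symm

lemma matchAt_some_elim (cs : List Char) (i : Nat) (d : String)
    (h : matchAt cs i = some d) :
    ∃ w, w ∈ get_number_strings ∧ d = convert_from_string_to_int w ∧
      w.toList <+: cs.drop i ∧ i < cs.length := by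
  simp only [matchAt, Option.map_eq_some_iff] at h
  obtain ⟨w, hw, hd⟩ := h
  have hmem := List.mem_of_find?_eq_some hw
  have hpred := List.find?_some hw
  rw [List.isPrefixOf_iff_prefix] at hpred
  refine ⟨w, hmem, hd.symm, hpred, ?_⟩
  by_contra hge
  have : cs.drop i = [] := List.drop_eq_nil_of_le (by omega)
  rw [this] at hpred
  exact words_ne w hmem (List.prefix_nil.mp hpred)

lemma matchAt_some_intro (cs : List Char) (i : Nat) (w : String)
    (hw : w ∈ get_number_strings) (hp : w.toList <+: cs.drop i) :
    matchAt cs i = some (convert_from_string_to_int w) := by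
  have hsome : (get_number_strings.find? (fun w => w.toList.isPrefixOf (cs.drop i))).isSome := by
    rw [List.find?_isSome]
    exact ⟨w, hw, by rw [List.isPrefixOf_iff_prefix]; exact hp⟩
  obtain ⟨w', hw'⟩ := Option.isSome_iff_exists.mp hsome
  have hmem := List.mem_of_find?_eq_some hw'
  have hpred := List.find?_some hw'
  rw [List.isPrefixOf_iff_prefix] at hpred
  have : w' = w := words_uniq_at w' w hmem hw _ hpred hp
  simp [matchAt, hw', this]

-- find / rfind vs matchAt
lemma find_spec_of_nonneg (cs : List Char) (w : String) (hw : w ∈ get_number_strings)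
    (h : 0 ≤ PySem.Chars.find cs w.toList) :
    w.toList <+: cs.drop (PySem.Chars.find cs w.toList).toNat ∧
    (PySem.Chars.find cs w.toList).toNat < cs.length ∧
    (∀ j, j < (PySem.Chars.find cs w.toList).toNat → ¬ w.toList <+: cs.drop j) := by
  have hne : PySem.Chars.findFrom cs w.toList ((0:Nat) : Int) none ≠ -1 := by
    simpa [PySem.Chars.findFrom_zero] using (by omega : PySem.Chars.find cs w.toList ≠ -1)
  obtain ⟨_, hpre, hmin⟩ :=
    PySem.Chars.findFrom_natCast_spec cs w.toList 0 (by omega) hne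
  simp only [Nat.cast_zero, PySem.Chars.findFrom_zero] at hpre hmin
  refine ⟨hpre, ?_, fun j hj => hmin j (by omega) hj⟩
  by_contra hge
  have : cs.drop (PySem.Chars.find cs w.toList).toNat = [] := List.drop_eq_nil_of_le (by omega)
  rw [this] at hpre
  exact words_ne w hw (List.prefix_nil.mp hpre)

lemma find_le_of_prefix (cs : List Char) (w : String) (j : Nat)
    (hp : w.toList <+: cs.drop j) :
    0 ≤ PySem.Chars.find cs w.toList ∧ PySem.Chars.find cs w.toList ≤ (j : Int) := by
  have h0 : 0 ≤ PySem.Chars.find cs w.toList := by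
    rw [PySem.Chars.find_nonneg_iff]
    exact hp.isInfix.trans (List.drop_suffix j cs).isInfix
  refine ⟨h0, ?_⟩
  have hne : PySem.Chars.findFrom cs w.toList ((0:Nat) : Int) none ≠ -1 := by
    simpa [PySem.Chars.findFrom_zero] using (by omega : PySem.Chars.find cs w.toList ≠ -1)
  obtain ⟨_, _, hmin⟩ := PySem.Chars.findFrom_natCast_spec cs w.toList 0 (by omega) hne
  simp only [Nat.cast_zero, PySem.Chars.findFrom_zero] at hmin
  by_contra hgt
  exact hmin j (by omega) (by omega) hp

lemma rfind_lt_length (cs : List Char) (w : String) (hw : w ∈ get_number_strings)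
    (h : 0 ≤ PySem.Chars.rfind cs w.toList) :
    w.toList <+: cs.drop (PySem.Chars.rfind cs w.toList).toNat ∧
    (PySem.Chars.rfind cs w.toList).toNat < cs.length := by
  rcases rfind_cases cs w.toList with h1 | ⟨h1, h2⟩
  · omega
  · refine ⟨h2, ?_⟩
    by_contra hge
    have : cs.drop (PySem.Chars.rfind cs w.toList).toNat = [] := List.drop_eq_nil_of_le (by omega)
    rw [this] at h2
    exact words_ne w hw (List.prefix_nil.mp h2)

-- ---------- Part 4: noop and winner lemmas for the four component folds ----------

lemma foldL_noop (cs : List Char) (ws : List String) (p : Int × String)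
    (h : ∀ w ∈ ws, ¬(0 ≤ PySem.Chars.find cs w.toList ∧ PySem.Chars.find cs w.toList < p.1)) :
    ws.foldl (stepL cs) p = p := by
  induction ws with
  | nil => rfl
  | cons w rest ih =>
    simp only [List.foldl_cons, stepL, if_neg (h w (by simp))]
    exact ih (fun x hx => h x (by simp [hx]))

lemma foldR_noop (cs : List Char) (ws : List String) (p : Int × String)
    (h : ∀ w ∈ ws, ¬(p.1 < PySem.Chars.rfind cs w.toList)) :
    ws.foldl (stepR cs) p = p := by
  induction ws with
  | nil => rfl
  | cons w rest ih =>
    simp only [List.foldl_cons, stepR, if_neg (h w (by simp))]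
    exact ih (fun x hx => h x (by simp [hx]))

lemma foldLp_noop (cs : List Char) (l : List Nat) (p : Int × String)
    (h : ∀ i ∈ l, matchAt cs i ≠ none → ¬((i : Int) < p.1)) :
    l.foldl (stepLp cs) p = p := by
  induction l with
  | nil => rfl
  | cons i rest ih =>
    have hstep : stepLp cs p i = p := by
      unfold stepLp
      cases hm : matchAt cs i with
      | none => rfl
      | some d => simp [if_neg (h i (by simp) (by simp [hm]))]
    simp only [List.foldl_cons, hstep]
    exact ih (fun x hx => h x (by simp [hx]))

lemma foldRp_noop (cs : List Char) (l : List Nat) (p : Int × String)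
    (h : ∀ i ∈ l, matchAt cs i ≠ none → ¬(p.1 < (i : Int))) :
    l.foldl (stepRp cs) p = p := by
  induction l with
  | nil => rfl
  | cons i rest ih =>
    have hstep : stepRp cs p i = p := by
      unfold stepRp
      cases hm : matchAt cs i with
      | none => rfl
      | some d => simp [if_neg (h i (by simp) (by simp [hm]))]
    simp only [List.foldl_cons, hstep]
    exact ih (fun x hx => h x (by simp [hx]))

lemma foldL_win (cs : List Char) (i0 : Nat) (w0 : String) :
    ∀ (ws : List String), w0 ∈ ws →
    PySem.Chars.find cs w0.toList = (i0 : Int) →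
    (∀ w ∈ ws, 0 ≤ PySem.Chars.find cs w.toList → (i0 : Int) ≤ PySem.Chars.find cs w.toList) →
    (∀ w ∈ ws, PySem.Chars.find cs w.toList = (i0 : Int) → w = w0) →
    ∀ (p : Int × String), (i0 : Int) < p.1 →
      ws.foldl (stepL cs) p = ((i0 : Int), convert_from_string_to_int w0) := by
  intro ws
  induction ws with
  | nil => intro h; exact absurd h (by simp)
  | cons w rest ih =>
    intro hmem h0 hge huniq p hp
    by_cases hw : w = w0
    · subst hw
      simp only [List.foldl_cons]
      have hstep : stepL cs p w = ((i0 : Int), convert_from_string_to_int w) := by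
        unfold stepL
        rw [h0, if_pos ⟨by positivity, hp⟩]
      rw [hstep]
      exact foldL_noop cs rest _ (fun x hx => by
        rintro ⟨ha, hb⟩
        have h2 := hge x (by simp [hx]) ha
        have hb' : PySem.Chars.find cs x.toList < (i0 : Int) := hb
        omega)
    · have hmem' : w0 ∈ rest := by
        rcases List.mem_cons.mp hmem with h | h
        · exact absurd h.symm hw
        · exact h
      simp only [List.foldl_cons]
      have hrec := fun p hp => ih hmem' h0
        (fun x hx => hge x (by simp [hx])) (fun x hx => huniq x (by simp [hx])) p hp
      unfold stepL
      split_ifs with hcond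
      · apply hrec
        simp only
        rcases hcond with ⟨ha, _⟩
        have hge1 := hge w (by simp) ha
        have : PySem.Chars.find cs w.toList ≠ (i0 : Int) := by
          intro he
          exact hw (huniq w (by simp) he)
        omega
      · exact hrec p hp

lemma foldR_win (cs : List Char) (i1 : Nat) (w1 : String) :
    ∀ (ws : List String), w1 ∈ ws →
    PySem.Chars.rfind cs w1.toList = (i1 : Int) →
    (∀ w ∈ ws, PySem.Chars.rfind cs w.toList ≤ (i1 : Int)) →
    (∀ w ∈ ws, PySem.Chars.rfind cs w.toList = (i1 : Int) → w = w1) →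
    ∀ (p : Int × String), p.1 < (i1 : Int) →
      ws.foldl (stepR cs) p = ((i1 : Int), convert_from_string_to_int w1) := by
  intro ws
  induction ws with
  | nil => intro h; exact absurd h (by simp)
  | cons w rest ih =>
    intro hmem h1 hle huniq p hp
    by_cases hw : w = w1
    · subst hw
      simp only [List.foldl_cons, stepR, h1, if_pos hp]
      exact foldR_noop cs rest _ (fun x hx => by
        have := hle x (by simp [hx])
        simp only
        omega)
    · have hmem' : w1 ∈ rest := by
        rcases List.mem_cons.mp hmem with h | h
        · exact absurd h.symm hw
        · exact h
      simp only [List.foldl_cons]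
      have hrec := fun p hp => ih hmem' h1
        (fun x hx => hle x (by simp [hx])) (fun x hx => huniq x (by simp [hx])) p hp
      unfold stepR
      split_ifs with hcond
      · apply hrec
        simp only
        have hle1 := hle w (by simp)
        have : PySem.Chars.rfind cs w.toList ≠ (i1 : Int) := by
          intro he
          exact hw (huniq w (by simp) he)
        omega
      · exact hrec p hp

lemma foldLp_win (cs : List Char) (i0 : Nat) (d0 : String) :
    ∀ (l : List Nat), l.Pairwise (· < ·) → i0 ∈ l →
    matchAt cs i0 = some d0 →
    (∀ j ∈ l, j < i0 → matchAt cs j = none) →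
    ∀ (p : Int × String), (i0 : Int) < p.1 →
      l.foldl (stepLp cs) p = ((i0 : Int), d0) := by
  intro l
  induction l with
  | nil => intro _ h; exact absurd h (by simp)
  | cons i rest ih =>
    intro hpw hmem hm hmin p hp
    rcases List.pairwise_cons.mp hpw with ⟨hlt, hpw'⟩
    by_cases hi : i = i0
    · subst hi
      simp only [List.foldl_cons, stepLp, hm, if_pos hp]
      exact foldLp_noop cs rest _ (fun j hj _ => by
        have := hlt j hj
        simp only
        omega)
    · have hmem' : i0 ∈ rest := by
        rcases List.mem_cons.mp hmem with h | h
        · exact absurd h.symm hi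
        · exact h
      have hii : i < i0 := hlt i0 hmem'
      have hnone : matchAt cs i = none := hmin i (by simp) hii
      simp only [List.foldl_cons, stepLp, hnone]
      exact ih hpw' hmem' hm (fun j hj => hmin j (by simp [hj])) p hp

lemma foldRp_win (cs : List Char) (i1 : Nat) (d1 : String) :
    ∀ (l : List Nat), l.Pairwise (· < ·) → i1 ∈ l →
    matchAt cs i1 = some d1 →
    (∀ j ∈ l, i1 < j → matchAt cs j = none) →
    ∀ (p : Int × String), p.1 < (i1 : Int) →
      l.foldl (stepRp cs) p = ((i1 : Int), d1) := by
  intro l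
  induction l with
  | nil => intro _ h; exact absurd h (by simp)
  | cons i rest ih =>
    intro hpw hmem hm hmax p hp
    rcases List.pairwise_cons.mp hpw with ⟨hlt, hpw'⟩
    by_cases hi : i = i1
    · subst hi
      simp only [List.foldl_cons, stepRp, hm, if_pos hp]
      exact foldRp_noop cs rest _ (fun j hj hms => by
        have := hmax j (by simp [hj]) (hlt j hj)
        exact absurd this hms)
    · simp only [List.foldl_cons]
      have hmem' : i1 ∈ rest := by
        rcases List.mem_cons.mp hmem with h | h
        · exact absurd h.symm hi
        · exact h
      have hrec := fun p hp => ih hpw' hmem' hm (fun j hj => hmax j (by simp [hj])) p hp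
      unfold stepRp
      cases hmm : matchAt cs i with
      | none => exact hrec p hp
      | some d =>
        split_ifs with hcond
        · apply hrec
          simp only
          exact_mod_cast hlt i1 hmem'
        · exact hrec p hp

-- ---------- Part 5: the two folds agree ----------

lemma left_fold_eq (cs : List Char) :
    get_number_strings.foldl (stepL cs) (1000000, "") =
      (List.range cs.length).foldl (stepLp cs) (1000000, "") := by
  by_cases hex : ∃ i, i < cs.length ∧ matchAt cs i ≠ none
  · classical
    set i0 := Nat.find hex with hi0
    obtain ⟨hi0n, hi0m⟩ := Nat.find_spec hex
    have hmin : ∀ j, j < i0 → matchAt cs j = none := by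
      intro j hj
      by_contra hne
      rcases Nat.lt_or_ge j cs.length with h | h
      · exact absurd ⟨h, hne⟩ (Nat.find_min hex hj)
      · cases hm : matchAt cs j with
        | none => exact hne hm
        | some d =>
          obtain ⟨_, _, _, _, hlt⟩ := matchAt_some_elim cs j d hm
          omega
    cases hm0 : matchAt cs i0 with
    | none => exact absurd hm0 hi0m
    | some d0 =>
      obtain ⟨w0, hw0mem, hd0, hp0, _⟩ := matchAt_some_elim cs i0 d0 hm0
      have hF0 : PySem.Chars.find cs w0.toList = (i0 : Int) := by
        obtain ⟨h0, hle⟩ := find_le_of_prefix cs w0 i0 hp0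
        obtain ⟨hpre, hlen, _⟩ := find_spec_of_nonneg cs w0 hw0mem h0
        have hm' : matchAt cs (PySem.Chars.find cs w0.toList).toNat ≠ none := by
          rw [matchAt_some_intro cs _ w0 hw0mem hpre]
          simp
        have hge : i0 ≤ (PySem.Chars.find cs w0.toList).toNat :=
          Nat.find_min' hex ⟨hlen, hm'⟩
        omega
      have hge : ∀ w ∈ get_number_strings, 0 ≤ PySem.Chars.find cs w.toList →
          (i0 : Int) ≤ PySem.Chars.find cs w.toList := by
        intro w hw h0
        obtain ⟨hpre, hlen, _⟩ := find_spec_of_nonneg cs w hw h0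
        have hm' : matchAt cs (PySem.Chars.find cs w.toList).toNat ≠ none := by
          rw [matchAt_some_intro cs _ w hw hpre]; simp
        have := Nat.find_min' hex ⟨hlen, hm'⟩
        omega
      have huniq : ∀ w ∈ get_number_strings, PySem.Chars.find cs w.toList = (i0 : Int) →
          w = w0 := by
        intro w hw he
        have h0 : 0 ≤ PySem.Chars.find cs w.toList := by omega
        obtain ⟨hpre, _, _⟩ := find_spec_of_nonneg cs w hw h0
        rw [he] at hpre
        simp only [Int.toNat_natCast] at hpre
        exact words_uniq_at w w0 hw hw0mem _ hpre hp0
      by_cases hbig : (i0 : Int) < 1000000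
      · rw [foldL_win cs i0 w0 get_number_strings hw0mem hF0 hge huniq (1000000, "") hbig]
        rw [foldLp_win cs i0 d0 (List.range cs.length) (List.pairwise_lt_range)
          (List.mem_range.mpr hi0n) hm0
          (fun j _ hj => hmin j hj) (1000000, "") hbig]
        rw [hd0]
      · rw [foldL_noop cs _ _ (fun w hw => by
          rintro ⟨ha, hb⟩
          have := hge w hw ha
          simp only at hb
          omega)]
        rw [foldLp_noop cs _ _ (fun i _ hms => by
          have : i0 ≤ i := by
            by_contra hlt
            exact hms (hmin i (by omega))
          simp only
          push_cast
          omega)]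
  · push_neg at hex
    have hnone : ∀ i, matchAt cs i = none := by
      intro i
      rcases Nat.lt_or_ge i cs.length with h | h
      · exact hex i h
      · cases hm : matchAt cs i with
        | none => rfl
        | some d =>
          obtain ⟨_, _, _, _, hlt⟩ := matchAt_some_elim cs i d hm
          omega
    rw [foldLp_noop cs _ _ (fun i _ hms => absurd (hnone i) hms)]
    rw [foldL_noop cs _ _ (fun w hw => by
      rintro ⟨ha, _⟩
      obtain ⟨hpre, _, _⟩ := find_spec_of_nonneg cs w hw ha
      have := matchAt_some_intro cs _ w hw hpre
      rw [hnone] at this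
      exact absurd this.symm (by simp))]

lemma right_fold_eq (cs : List Char) :
    get_number_strings.foldl (stepR cs) (-1, "") =
      (List.range cs.length).foldl (stepRp cs) (-1, "") := by
  by_cases hex : ∃ i, i < cs.length ∧ matchAt cs i ≠ none
  · classical
    obtain ⟨iw, hiwn, hiwm⟩ := hex
    set i1 := Nat.findGreatest (fun i => matchAt cs i ≠ none) (cs.length - 1) with hi1
    have hiw_le : iw ≤ cs.length - 1 := by omega
    have hm1 : matchAt cs i1 ≠ none := Nat.findGreatest_spec (P := fun i => matchAt cs i ≠ none) hiw_le hiwm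
    have hi1n : i1 < cs.length := by
      have := Nat.findGreatest_le (P := fun i => matchAt cs i ≠ none) (cs.length - 1)
      omega
    have hmax : ∀ j, i1 < j → matchAt cs j = none := by
      intro j hj
      by_contra hne
      rcases Nat.lt_or_ge j cs.length with h | h
      · exact (Nat.findGreatest_is_greatest hj (by omega)) hne
      · cases hm : matchAt cs j with
        | none => exact hne hm
        | some d =>
          obtain ⟨_, _, _, _, hlt⟩ := matchAt_some_elim cs j d hm
          omega
    cases hm1' : matchAt cs i1 with
    | none => exact absurd hm1' hm1
    | some d1 =>
      obtain ⟨w1, hw1mem, hd1, hp1, _⟩ := matchAt_some_elim cs i1 d1 hm1'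
      have hR1 : PySem.Chars.rfind cs w1.toList = (i1 : Int) := by
        have hge := le_rfind cs w1.toList (words_ne w1 hw1mem) i1 hp1
        obtain ⟨hpre, hlen⟩ := rfind_lt_length cs w1 hw1mem (by omega)
        have hm' : matchAt cs (PySem.Chars.rfind cs w1.toList).toNat ≠ none := by
          rw [matchAt_some_intro cs _ w1 hw1mem hpre]; simp
        have : (PySem.Chars.rfind cs w1.toList).toNat ≤ i1 := by
          by_contra hgt
          exact hm' (hmax _ (by omega))
        omega
      have hle : ∀ w ∈ get_number_strings, PySem.Chars.rfind cs w.toList ≤ (i1 : Int) := by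
        intro w hw
        rcases rfind_cases cs w.toList with h | ⟨h0, _⟩
        · omega
        · obtain ⟨hpre, hlen⟩ := rfind_lt_length cs w hw h0
          have hm' : matchAt cs (PySem.Chars.rfind cs w.toList).toNat ≠ none := by
            rw [matchAt_some_intro cs _ w hw hpre]; simp
          have : (PySem.Chars.rfind cs w.toList).toNat ≤ i1 := by
            by_contra hgt
            exact hm' (hmax _ (by omega))
          omega
      have huniq : ∀ w ∈ get_number_strings, PySem.Chars.rfind cs w.toList = (i1 : Int) →
          w = w1 := by
        intro w hw he
        obtain ⟨hpre, _⟩ := rfind_lt_length cs w hw (by omega)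
        rw [he] at hpre
        simp only [Int.toNat_natCast] at hpre
        exact words_uniq_at w w1 hw hw1mem _ hpre hp1
      rw [foldR_win cs i1 w1 get_number_strings hw1mem hR1 hle huniq (-1, "") (by
        show (-1 : Int) < (i1 : Int)
        omega)]
      rw [foldRp_win cs i1 d1 (List.range cs.length) (List.pairwise_lt_range)
        (List.mem_range.mpr hi1n) hm1' (fun j _ hj => hmax j hj) (-1, "") (by
        show (-1 : Int) < (i1 : Int)
        omega)]
      rw [hd1]
  · push_neg at hex
    have hnone : ∀ i, matchAt cs i = none := by
      intro i
      rcases Nat.lt_or_ge i cs.length with h | h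
      · exact hex i h
      · cases hm : matchAt cs i with
        | none => rfl
        | some d =>
          obtain ⟨_, _, _, _, hlt⟩ := matchAt_some_elim cs i d hm
          omega
    rw [foldRp_noop cs _ _ (fun i _ hms => absurd (hnone i) hms)]
    rw [foldR_noop cs _ _ (fun w hw => by
      intro ha
      have h0 : 0 ≤ PySem.Chars.rfind cs w.toList := by omega
      obtain ⟨hpre, _⟩ := rfind_lt_length cs w hw h0
      have := matchAt_some_intro cs _ w hw hpre
      rw [hnone] at this
      exact absurd this.symm (by simp))]

-- ===== VERDICT (by name: the statement is the Claim_ definition above) =====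
theorem find_integer_string_spec : Claim_equal_find_integer_string := by
  intro line _
  unfold Spec_find_integer_string find_integer_string find_integer_string_alt
  rw [outer_fold line get_number_strings words_ne (1000000, -1, "", "") (by norm_num)]
  rw [foldB_split line, foldPos_split line.toList]
  rw [left_fold_eq line.toList, right_fold_eq line.toList]
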